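-- pv_equiv track=rewrite | github.com/Ar-i-s/Backgammon | Backgammon/logic.py | get_possible_bearoffs
-- ===== SOURCE A (Python) =====
-- def get_possible_bearoffs(points, draw, player):
--     n = len(points) // 4
--     bearoffs = []
--     for d in sorted(draw, reverse=True):
--         for i, point in enumerate(points[n-1::-1]):
--             index = n - i
--             if player in point and index <= d:
--                 bearoffs.append((index - 1, d))
--                 break
--
--     return bearoffs
-- ===== SOURCE B (Python) =====
-- def get_possible_bearoffs(points, draw, player):
--     n = len(points) // 4
--     # occupied bear-off indices, strictly decreasing by construction
--     occ = [n - i for i, point in enumerate(points[n-1::-1]) if player in point]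
--     bearoffs = []
--     for d in sorted(draw, reverse=True):
--         # binary search for the first position whose index is <= d
--         lo, hi = 0, len(occ)
--         while lo < hi:
--             mid = (lo + hi) // 2
--             if occ[mid] <= d:
--                 hi = mid
--             else:
--                 lo = mid + 1
--         if lo < len(occ):
--             bearoffs.append((occ[lo] - 1, d))
--     return bearoffs
-- ===== Notes on version B (the rewrite author's own statement) =====
-- stated objective: faster
-- what changed: B builds the strictly-decreasing list of occupied bear-off indices once and answers each die with a hand-written binary search for the first index <= d, replacing A's per-die linear re-enumeration of the reversed board with membership tests.
import Mathlib
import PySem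

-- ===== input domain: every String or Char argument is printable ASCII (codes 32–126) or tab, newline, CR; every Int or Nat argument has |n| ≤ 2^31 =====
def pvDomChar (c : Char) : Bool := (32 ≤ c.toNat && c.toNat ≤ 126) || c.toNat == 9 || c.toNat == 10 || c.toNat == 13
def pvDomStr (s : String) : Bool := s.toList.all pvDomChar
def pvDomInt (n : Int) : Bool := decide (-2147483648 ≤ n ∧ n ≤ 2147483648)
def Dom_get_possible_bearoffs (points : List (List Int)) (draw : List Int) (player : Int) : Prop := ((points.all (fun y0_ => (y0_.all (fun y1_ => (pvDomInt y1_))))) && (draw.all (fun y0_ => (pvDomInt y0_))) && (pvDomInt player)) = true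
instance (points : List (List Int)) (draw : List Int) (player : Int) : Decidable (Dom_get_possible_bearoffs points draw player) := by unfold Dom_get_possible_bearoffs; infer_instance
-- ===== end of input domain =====

-- B precomputes the occupied bear-off indices once (strictly decreasing) and answers each die
-- with a hand-written binary search, replacing A's per-die linear re-enumeration of the board.

-- ===== PORT A =====
-- inner 'for i, point in enumerate(points[n-1::-1]): … break' of A
def pvScanA (n d player : Int) (acc : List (Int × Int)) : List (Int × List Int) → List (Int × Int)
  | [] => acc
  | (i, point) :: rest =>
      let index := n - i
      if point.contains player ∧ index ≤ d then acc ++ [(index - 1, d)]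
      else pvScanA n d player acc rest

def get_possible_bearoffs (points : List (List Int)) (draw : List Int) (player : Int) : List (Int × Int) :=
  let n : Int := PySem.Int.floordiv (points.length : Int) 4
  -- points[n-1::-1]; step -1 ≠ 0, so the slice always succeeds (getD is never taken)
  let rev := (PySem.List.slice? points (some (n - 1)) none (-1)).getD []
  (PySem.List.sorted draw (fun x => x) true).foldl
    (fun acc d => pvScanA n d player acc (PySem.List.enumerate rev)) []

-- ===== PORT B =====
-- the 'while lo < hi: …' binary-search loop of B; indices stay in range, so getD is never taken
def pvBisect (occ : List Int) (d : Int) (lo hi : Int) : Int :=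
  if lo < hi then
    let mid := PySem.Int.floordiv (lo + hi) 2
    if (PySem.List.pyGet? occ mid).getD 0 ≤ d then pvBisect occ d lo mid
    else pvBisect occ d (mid + 1) hi
  else lo
termination_by (hi - lo).toNat
decreasing_by
  · have h2 : PySem.Int.floordiv (lo + hi) 2 < hi := by
      rw [PySem.Int.floordiv_lt_iff_lt_mul (by omega : (0:Int) < 2)]; omega
    omega
  · have h := PySem.Int.floordiv_two_mid_bounds (lo := lo) (hi := hi) (by omega)
    omega

def get_possible_bearoffs_alt (points : List (List Int)) (draw : List Int) (player : Int) : List (Int × Int) :=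
  let n : Int := PySem.Int.floordiv (points.length : Int) 4
  -- occ = [n - i for i, point in enumerate(points[n-1::-1]) if player in point]
  let occ := (PySem.List.enumerate ((PySem.List.slice? points (some (n - 1)) none (-1)).getD [])).filterMap
      (fun ip => if ip.2.contains player then some (n - ip.1) else none)
  (PySem.List.sorted draw (fun x => x) true).foldl
    (fun acc d =>
      let lo := pvBisect occ d 0 (occ.length : Int)
      -- occ[lo] is in range whenever lo < len(occ); getD is never taken
      if lo < (occ.length : Int) then acc ++ [((PySem.List.pyGet? occ lo).getD 0 - 1, d)] else acc) []

-- ===== PRECONDITION & SPEC =====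
def Spec_get_possible_bearoffs (points : List (List Int)) (draw : List Int) (player : Int) (out : List (Int × Int)) : Prop := out = get_possible_bearoffs_alt points draw player
instance (points : List (List Int)) (draw : List Int) (player : Int) (out : List (Int × Int)) : Decidable (Spec_get_possible_bearoffs points draw player out) := by unfold Spec_get_possible_bearoffs; infer_instance

-- ===== CLAIM (what is proved, stated in full; the proofs are below) =====
def Claim_equal_get_possible_bearoffs : Prop := ∀ (points : List (List Int)) (draw : List Int) (player : Int), Dom_get_possible_bearoffs points draw player → Spec_get_possible_bearoffs points draw player (get_possible_bearoffs points draw player)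

-- ===== LEMMAS AND PROOFS =====

-- abstract first-match scan over the candidate index list (proof device linking the two ports)
def pvScanC (d : Int) (acc : List (Int × Int)) : List Int → List (Int × Int)
  | [] => acc
  | idx :: rest => if idx ≤ d then acc ++ [(idx - 1, d)] else pvScanC d acc rest

-- A's break-at-first scan equals the first-match scan of the candidate list
lemma pvScanA_eq_pvScanC (n d player : Int) :
    ∀ (l : List (Int × List Int)) (acc : List (Int × Int)),
      pvScanA n d player acc l =
      pvScanC d acc (l.filterMap (fun ip => if ip.2.contains player then some (n - ip.1) else none)) := by
  intro l
  induction l with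
  | nil => intro acc; rfl
  | cons hd tl ih =>
      intro acc
      obtain ⟨i, point⟩ := hd
      by_cases hc : player ∈ point
      · by_cases hle : n - i ≤ d
        · simp [pvScanA, pvScanC, hc, hle]
        · simp [pvScanA, pvScanC, hc, hle, ih]
      · simp [pvScanA, hc, ih]

lemma pvScanC_all_gt (d : Int) (acc : List (Int × Int)) :
    ∀ (cs : List Int), (∀ x ∈ cs, d < x) → pvScanC d acc cs = acc := by
  intro cs
  induction cs with
  | nil => intro _; rfl
  | cons x rest ih =>
      intro h
      have hx := h x (by simp)
      simp only [pvScanC, if_neg (by omega : ¬ x ≤ d)]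
      exact ih (fun y hy => h y (by simp [hy]))

lemma pvScanC_split (d : Int) (acc : List (Int × Int)) (x : Int) (hx : x ≤ d) :
    ∀ (c1 c2 : List Int), (∀ y ∈ c1, d < y) →
      pvScanC d acc (c1 ++ x :: c2) = acc ++ [(x - 1, d)] := by
  intro c1
  induction c1 with
  | nil => intro c2 _; simp [pvScanC, hx]
  | cons y rest ih =>
      intro c2 h
      have hy := h y (by simp)
      simp only [List.cons_append, pvScanC, if_neg (by omega : ¬ y ≤ d)]
      exact ih c2 (fun z hz => h z (by simp [hz]))

-- binary-search invariant: result r is between lo and hi, everything before r is > d,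
-- everything from r on is ≤ d (needs the predicate to be upward closed along the list)
lemma pvBisect_spec (cs : List Int) (d : Int)
    (hmono : ∀ i j : Nat, ∀ hij : i ≤ j, ∀ hj : j < cs.length, getElem cs i (by omega) ≤ d → cs[j] ≤ d) :
    ∀ (m : Nat) (lo hi : Int), (hi - lo).toNat = m → 0 ≤ lo → lo ≤ hi → hi ≤ (cs.length : Int) →
      (∀ k : Nat, (k : Int) < lo → ∀ h : k < cs.length, d < cs[k]) →
      (∀ k : Nat, hi ≤ (k : Int) → ∀ h : k < cs.length, cs[k] ≤ d) →
      lo ≤ pvBisect cs d lo hi ∧ pvBisect cs d lo hi ≤ hi ∧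
      (∀ k : Nat, (k : Int) < pvBisect cs d lo hi → ∀ h : k < cs.length, d < cs[k]) ∧
      (∀ k : Nat, pvBisect cs d lo hi ≤ (k : Int) → ∀ h : k < cs.length, cs[k] ≤ d) := by
  intro m
  induction m using Nat.strong_induction_on with
  | _ m ih =>
      intro lo hi hm h0 hlh hlen hpre hpost
      by_cases hlt : lo < hi
      · have hmid := PySem.Int.floordiv_two_mid_bounds (lo := lo) (hi := hi) (by omega)
        have hmidlt : PySem.Int.floordiv (lo + hi) 2 < hi := by
          rw [PySem.Int.floordiv_lt_iff_lt_mul (by omega : (0:Int) < 2)]; omega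
        set mid := PySem.Int.floordiv (lo + hi) 2 with hmiddef
        have hmid0 : 0 ≤ mid := by omega
        have hmidlen : mid < (cs.length : Int) := by omega
        have hmidn : mid.toNat < cs.length := by omega
        have hget : (PySem.List.pyGet? cs mid).getD 0 = cs[mid.toNat] := by
          rw [PySem.List.pyGet?_of_nonneg cs hmid0]
          simp [List.getElem?_eq_getElem hmidn]
        rw [pvBisect]
        simp only [if_pos hlt, ← hmiddef, hget]
        by_cases hcm : cs[mid.toNat] ≤ d
        · simp only [if_pos hcm]
          refine (ih (hi := mid) (lo := lo) ((mid - lo).toNat) (by omega) rfl h0 (by omega) (by omega) hpre ?_).imp id (fun h => ⟨by omega, h.2⟩)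
          intro k hk h
          exact hmono mid.toNat k (by omega) h hcm
        · simp only [if_neg hcm]
          refine (ih (hi := hi) (lo := mid + 1) ((hi - (mid + 1)).toNat) (by omega) rfl (by omega) (by omega) hlen ?_ hpost).imp (fun h => by omega) id
          intro k hk h
          rcases lt_or_ge (k : Int) lo with hkm | hkm
          · exact hpre k hkm h
          · by_contra hng
            exact hcm (hmono k mid.toNat (by omega) hmidn (by omega))
      · rw [pvBisect, if_neg hlt]
        exact ⟨le_refl _, by omega, hpre, fun k hk h => hpost k (by omega) h⟩

-- the first-match scan of a strictly decreasing list equals B's binary-search lookup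
lemma pvScanC_eq_bisect (d : Int) (acc : List (Int × Int)) (cs : List Int)
    (hdesc : cs.Pairwise (fun a b => b < a)) :
    pvScanC d acc cs =
      (let lo := pvBisect cs d 0 (cs.length : Int);
       if lo < (cs.length : Int) then acc ++ [((PySem.List.pyGet? cs lo).getD 0 - 1, d)] else acc) := by
  have hpw := (List.pairwise_iff_getElem).1 hdesc
  have hmono : ∀ i j : Nat, ∀ hij : i ≤ j, ∀ hj : j < cs.length, getElem cs i (by omega) ≤ d → cs[j] ≤ d := by
    intro i j hij hj hle
    rcases Nat.lt_or_ge i j with h | h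
    · have := hpw i j (by omega) hj h; omega
    · have : i = j := by omega
      subst this; exact hle
  obtain ⟨h1, h2, h3, h4⟩ := pvBisect_spec cs d hmono ((cs.length : Int) - 0).toNat 0 (cs.length : Int)
    rfl (le_refl _) (by positivity) (le_refl _)
    (by intro k hk _; omega) (by intro k hk h; omega)
  set r := pvBisect cs d 0 (cs.length : Int) with hr
  by_cases hrl : r < (cs.length : Int)
  · -- cs = take r ++ cs[r] :: drop (r+1); prefix all > d, cs[r] ≤ d
    have hrn : r.toNat < cs.length := by omega
    have hgr : cs[r.toNat] ≤ d := h4 r.toNat (by omega) hrn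
    have hsplit : cs = cs.take r.toNat ++ cs[r.toNat] :: cs.drop (r.toNat + 1) := by
      rw [List.getElem_cons_drop, List.take_append_drop]
    have hget : (PySem.List.pyGet? cs r).getD 0 = cs[r.toNat] := by
      rw [PySem.List.pyGet?_of_nonneg cs (by omega)]
      simp [List.getElem?_eq_getElem hrn]
    simp only [if_pos hrl, hget]
    calc pvScanC d acc cs = pvScanC d acc (cs.take r.toNat ++ cs[r.toNat] :: cs.drop (r.toNat + 1)) := by rw [← hsplit]
      _ = acc ++ [(cs[r.toNat] - 1, d)] := by
          apply pvScanC_split d acc _ hgr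
          intro y hy
          obtain ⟨i, hi, hyi⟩ := List.mem_iff_getElem.1 hy
          have hilen : i < cs.length := by
            have := List.length_take_le r.toNat cs; omega
          have : (cs.take r.toNat)[i] = cs[i] := List.getElem_take
          rw [this] at hyi
          subst hyi
          exact h3 i (by have := hi; simp [List.length_take] at this; omega) hilen
  · simp only [if_neg hrl]
    apply pvScanC_all_gt
    intro x hx
    obtain ⟨i, hi, hxi⟩ := List.mem_iff_getElem.1 hx
    subst hxi
    exact h3 i (by omega) hi

-- the candidate list is strictly decreasing (indices of enumerate strictly increase)
lemma pvCands_desc (n player : Int) (l : List (Int × List Int))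
    (hl : l.Pairwise (fun p q => p.1 < q.1)) :
    (l.filterMap (fun ip => if ip.2.contains player then some (n - ip.1) else none)).Pairwise
      (fun a b => b < a) := by
  rw [List.pairwise_filterMap]
  refine hl.imp ?_
  intro p q hpq a ha b hb
  split_ifs at ha hb with h1 h2
  all_goals simp_all
  omega

-- ===== VERDICT (by name: the statement is the Claim_ definition above) =====
theorem get_possible_bearoffs_spec : Claim_equal_get_possible_bearoffs := by
  intro points draw player _
  unfold Spec_get_possible_bearoffs get_possible_bearoffs get_possible_bearoffs_alt
  simp only []
  apply PySem.List.foldl_congr_mem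
  intro acc d _
  rw [pvScanA_eq_pvScanC]
  exact pvScanC_eq_bisect d acc _ (pvCands_desc _ _ _ (PySem.List.pairwise_lt_enumerate _ _))
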